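-- pv_equiv track=rewrite | github.com/HubbleNetwork/sdr-docker | src/decoder/fast_decoder_v1.py | _dewhitening_symbols
-- ===== SOURCE A (Python) =====
-- NUM_CHANNELS = 19
--
-- def _dewhitening_symbols(seed, symbols):
--     """
--     Dewhiten the given symbols using LFSR7
--
--     Args:
--         seed (int): The seed for the LFSR
--         symbols (list): The symbols to dewhiten
--
--     Returns:
--         list: The dewhitened symbols or None if failed
--     """
--
--     # the seed can't be bigger than the transmit channels
--     if seed < 0 or seed >= NUM_CHANNELS:
--         return None
--
--     # force to 6 bits (more like a safeguard)
--     # TODO: maybe return error if symbols val > 6 bits value?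
--     out = [(s & 0b111111) for s in symbols]
--
--     seed = 0b1000000 | seed
--     state = (3 << 5) | seed
--
--     symbol_state = 0
--     sym_idx = 0
--
--     # Let's do the dewhitening in place instead of generating
--     # all masks and apply later
--     for i in range(len(symbols) * 6):
--         # pack 6 masking bits into 1 symbol (MSB first)
--         symbol_state |= (((state & 0x40) >> 6) << (5 - (i % 6)))
--
--         if (i % 6) == 5:
--             out[sym_idx] ^= symbol_state
--
--             # just a safe guard to keep 6 bits
--             out[sym_idx] &= 0b111111
--             sym_idx += 1
--             symbol_state = 0
--
--         # taps at 7 and 4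
--         fb = ((state >> 6) ^ (state >> 3)) & 1
--         state = ((state << 1) & 0x7F) | fb
--
--     return out
-- ===== SOURCE B (Python) =====
-- NUM_CHANNELS = 19
--
--
-- def _pn_period(state):
--     # one full period (127 bits) of the LFSR7 output stream, MSB of the state
--     bits = []
--     for _ in range(127):
--         bits.append((state >> 6) & 1)
--         state = ((state << 1) & 0x7F) | (((state >> 6) ^ (state >> 3)) & 1)
--     return bits
--
--
-- def _mask_at(bits, pos):
--     # 6 whitening bits starting at stream position pos, MSB first
--     m = 0
--     for b in range(6):
--         m = (m << 1) | bits[(pos + b) % 127]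
--     return m
--
--
-- def _dewhitening_symbols(seed, symbols):
--     if seed < 0 or seed >= NUM_CHANNELS:
--         return None
--     bits = _pn_period((3 << 5) | (0b1000000 | seed))
--     return [(s & 0b111111) ^ _mask_at(bits, 6 * j) for j, s in enumerate(symbols)]
-- ===== Notes on version B (the rewrite author's own statement) =====
-- stated objective: alternative
-- what changed: A threads the LFSR state through a flat loop over all len(symbols)*6 bit positions; B instead precomputes one full 127-bit period of the (maximal) LFSR7 PN sequence as a table and dewhitens each symbol independently by modular indexing into that table, with no LFSR state in the symbol pass.
import Mathlib
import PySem

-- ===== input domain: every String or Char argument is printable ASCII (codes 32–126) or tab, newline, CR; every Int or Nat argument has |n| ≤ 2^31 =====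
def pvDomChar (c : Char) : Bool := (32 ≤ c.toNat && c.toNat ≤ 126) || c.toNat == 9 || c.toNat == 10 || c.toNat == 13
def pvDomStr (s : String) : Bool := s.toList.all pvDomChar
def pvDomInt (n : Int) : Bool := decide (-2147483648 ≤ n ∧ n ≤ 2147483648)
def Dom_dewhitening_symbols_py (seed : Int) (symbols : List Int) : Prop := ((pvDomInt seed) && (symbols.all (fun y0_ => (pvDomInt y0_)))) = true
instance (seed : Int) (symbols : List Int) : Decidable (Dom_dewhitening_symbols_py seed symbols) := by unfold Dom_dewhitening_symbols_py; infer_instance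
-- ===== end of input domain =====

-- B replaces A's flat state-threading loop over len(symbols)*6 bit positions by a precomputed
-- 127-bit period of the (maximal) LFSR7 PN sequence applied per symbol by modular indexing;
-- same return value, no mutation visible to the caller in either version.

-- ===== PORT A =====
-- Loop body of A's 'for i in range(len(symbols)*6)' (named so the proofs can cite it).
-- accumulator: (out, state, symbol_state, sym_idx).  sym_idx is a Nat list index; it is
-- provably in range whenever Python indexes, so List.set / List.getD are exact here.
-- (5 - i % 6).toNat is exact: i % 6 ∈ [0,5] so the shift amount is a nonnegative int.
def pvALoop (acc : List Int × Int × Int × Nat) (i : Int) : List Int × Int × Int × Nat :=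
  let out := acc.1
  let state := acc.2.1
  let sym_idx := acc.2.2.2
  let symbol_state :=
    PySem.Int.bor acc.2.2.1 ((PySem.Int.band state 64 >>> 6) <<< (5 - PySem.Int.mod i 6).toNat)
  let fb := PySem.Int.band (PySem.Int.bxor (state >>> 6) (state >>> 3)) 1
  let state' := PySem.Int.bor (PySem.Int.band (state <<< 1) 127) fb
  if PySem.Int.mod i 6 == 5 then
    (out.set sym_idx (PySem.Int.band (PySem.Int.bxor (out.getD sym_idx 0) symbol_state) 63),
     state', 0, sym_idx + 1)
  else
    (out, state', symbol_state, sym_idx)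

def dewhitening_symbols_py (seed : Int) (symbols : List Int) : Option (List Int) :=
  if seed < 0 ∨ 19 ≤ seed then none
  else
    let out := symbols.map (fun s => PySem.Int.band s 63)
    let seed2 := PySem.Int.bor 64 seed
    let state : Int := PySem.Int.bor ((3:Int) <<< 5) seed2
    some ((PySem.List.pyRange 0 (symbols.length * 6) 1).foldl pvALoop (out, state, 0, 0)).1

-- ===== PORT B =====
-- Source B's _pn_period: one full 127-bit period of the LFSR7 output stream (MSB of the state),
-- collected by a loop over range(127) threading (bits, state).
def pvPnPeriod (state : Int) : List Int :=
  ((List.range 127).foldl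
    (fun (acc : List Int × Int) _ =>
      (acc.1 ++ [PySem.Int.band (acc.2 >>> 6) 1],
       PySem.Int.bor (PySem.Int.band (acc.2 <<< 1) 127)
         (PySem.Int.band (PySem.Int.bxor (acc.2 >>> 6) (acc.2 >>> 3)) 1)))
    ([], state)).1

-- Source B's _mask_at: bits[(pos + b) % 127] is always a valid index (0 ≤ (pos+b)%127 < 127 = len bits
-- for the lists B passes), so pyGetD with default 0 is exact here.
def pvMaskAt (bits : List Int) (pos : Int) : Int :=
  (List.range 6).foldl
    (fun (m : Int) (b : Nat) =>
      PySem.Int.bor (m <<< 1) (PySem.List.pyGetD bits (PySem.Int.mod (pos + (b : Int)) 127) 0))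
    0

def dewhitening_symbols_py_alt (seed : Int) (symbols : List Int) : Option (List Int) :=
  if seed < 0 ∨ 19 ≤ seed then none
  else
    let bits := pvPnPeriod (PySem.Int.bor ((3:Int) <<< 5) (PySem.Int.bor 64 seed))
    some ((PySem.List.enumerate symbols).map
      (fun p => PySem.Int.bxor (PySem.Int.band p.2 63) (pvMaskAt bits (6 * p.1))))

-- ===== PRECONDITION & SPEC =====
def Spec_dewhitening_symbols_py (seed : Int) (symbols : List Int) (out : Option (List Int)) : Prop := out = dewhitening_symbols_py_alt seed symbols
instance (seed : Int) (symbols : List Int) (out : Option (List Int)) : Decidable (Spec_dewhitening_symbols_py seed symbols out) := by unfold Spec_dewhitening_symbols_py; infer_instance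

-- ===== CLAIM (what is proved, stated in full; the proofs are below) =====
def Claim_equal_dewhitening_symbols_py : Prop := ∀ (seed : Int) (symbols : List Int), Dom_dewhitening_symbols_py seed symbols → Spec_dewhitening_symbols_py seed symbols (dewhitening_symbols_py seed symbols)

-- ===== LEMMAS AND PROOFS =====

-- Proof-side intermediate: a per-symbol recursion with the LFSR state threaded through.
-- A's flat loop is reduced to it (pvMain), and B's table version is reduced to it too (pvGoTable).
def pvLfsrStep (state : Int) : Int :=
  PySem.Int.bor (PySem.Int.band (state <<< 1) 127)
    (PySem.Int.band (PySem.Int.bxor (state >>> 6) (state >>> 3)) 1)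

def pvNextMask (state : Int) : Int × Int :=
  (List.range 6).foldl
    (fun p _ => (PySem.Int.bor (p.1 <<< 1) (PySem.Int.band (p.2 >>> 6) 1), pvLfsrStep p.2))
    (0, state)

def pvDewhitenGo (state : Int) : List Int → List Int
  | [] => []
  | s :: rest =>
    let m := pvNextMask state
    (PySem.Int.bxor (PySem.Int.band s 63) m.1) :: pvDewhitenGo m.2 rest

-- the LFSR step on 7-bit states, over Fin 128
def pvStepF (s : Fin 128) : Fin 128 :=
  ⟨(((s.val <<< 1) &&& 127) ||| (((s.val >>> 6) ^^^ (s.val >>> 3)) &&& 1)) % 128,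
    Nat.mod_lt _ (by norm_num)⟩

def pvMsb (s : Fin 128) : Int := PySem.Int.band ((s : Int) >>> 6) 1

lemma pvStepInt_eq : ∀ s : Fin 128,
    PySem.Int.bor (PySem.Int.band ((s : Int) <<< 1) 127)
      (PySem.Int.band (PySem.Int.bxor ((s : Int) >>> 6) ((s : Int) >>> 3)) 1)
    = ((pvStepF s : Fin 128) : Int) := by decide

lemma pvBand63_bounds (t : Int) : 0 ≤ PySem.Int.band t 63 ∧ PySem.Int.band t 63 < 64 := by
  unfold PySem.Int.band
  split_ifs with h1 h2
  · have h : t.toNat &&& (63:Int).toNat ≤ (63:Int).toNat := Nat.and_le_right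
    omega
  · omega
  · have h : (63:Int).toNat &&& (-t-1).toNat ≤ (63:Int).toNat := Nat.and_le_left
    omega
  · omega

set_option maxRecDepth 8192 in
lemma pvNextMask_bounds : ∀ s : Fin 128,
    0 ≤ (pvNextMask (s : Int)).1 ∧ (pvNextMask (s : Int)).1 < 64 ∧
    0 ≤ (pvNextMask (s : Int)).2 ∧ (pvNextMask (s : Int)).2 < 128 := by decide

set_option maxRecDepth 8192 in
lemma pvXorMask : ∀ (u m : Fin 64),
    PySem.Int.band (PySem.Int.bxor (u : Int) (m : Int)) 63 = PySem.Int.bxor (u : Int) (m : Int) := by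
  decide

lemma pvXorMask' (u m : Int) (hu0 : 0 ≤ u) (hu : u < 64) (hm0 : 0 ≤ m) (hm : m < 64) :
    PySem.Int.band (PySem.Int.bxor u m) 63 = PySem.Int.bxor u m := by
  have h := pvXorMask ⟨u.toNat, by omega⟩ ⟨m.toNat, by omega⟩
  simpa [Int.toNat_of_nonneg hu0, Int.toNat_of_nonneg hm0] using h

lemma pvRangeSix (a : Int) :
    PySem.List.pyRange a (a + 6) 1 = [a, a + 1, a + 2, a + 3, a + 4, a + 5] := by
  rw [PySem.List.pyRange_one_cons (by omega), PySem.List.pyRange_one_cons (by omega),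
      PySem.List.pyRange_one_cons (by omega), PySem.List.pyRange_one_cons (by omega),
      PySem.List.pyRange_one_cons (by omega), PySem.List.pyRange_one_cons (by omega),
      PySem.List.pyRange_one_eq_nil (by omega)]
  simp only [List.cons.injEq, and_true, true_and]
  omega

-- one 6-index chunk of A's flat loop = one step of the per-symbol recursion
set_option maxRecDepth 32768 in
lemma pvChunk (s : Fin 128) (out : List Int) (j : Nat) :
    List.foldl pvALoop (out, (s : Int), 0, j)
      [6 * (j : Int), 6 * j + 1, 6 * j + 2, 6 * j + 3, 6 * j + 4, 6 * j + 5]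
    = (out.set j (PySem.Int.band (PySem.Int.bxor (out.getD j 0) (pvNextMask (s : Int)).1) 63),
       (pvNextMask (s : Int)).2, 0, j + 1) := by
  have m0 : PySem.Int.mod (6 * (j:Int)) 6 = 0 := by
    rw [PySem.Int.mod_eq_emod_of_pos (by omega)]; omega
  have m1 : PySem.Int.mod (6 * (j:Int) + 1) 6 = 1 := by
    rw [PySem.Int.mod_eq_emod_of_pos (by omega)]; omega
  have m2 : PySem.Int.mod (6 * (j:Int) + 2) 6 = 2 := by
    rw [PySem.Int.mod_eq_emod_of_pos (by omega)]; omega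
  have m3 : PySem.Int.mod (6 * (j:Int) + 3) 6 = 3 := by
    rw [PySem.Int.mod_eq_emod_of_pos (by omega)]; omega
  have m4 : PySem.Int.mod (6 * (j:Int) + 4) 6 = 4 := by
    rw [PySem.Int.mod_eq_emod_of_pos (by omega)]; omega
  have m5 : PySem.Int.mod (6 * (j:Int) + 5) 6 = 5 := by
    rw [PySem.Int.mod_eq_emod_of_pos (by omega)]; omega
  simp only [List.foldl_cons, List.foldl_nil, pvALoop, m0, m1, m2, m3, m4, m5, Int.reduceBEq,
    if_true, if_false, Bool.false_eq_true, Int.reduceSub, Int.reduceToNat]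
  simp only [Prod.mk.injEq]
  refine ⟨?_, ?_⟩
  · congr 1
    congr 1
    congr 1
    revert s; decide
  · revert s; decide

lemma pvMain (todo : List Int) : ∀ (done : List Int) (s : Fin 128),
    (List.foldl pvALoop (done ++ todo.map (fun t => PySem.Int.band t 63), (s : Int), 0, done.length)
      (PySem.List.pyRange (6 * done.length) (6 * done.length + 6 * todo.length) 1)).1
    = done ++ pvDewhitenGo (s : Int) todo := by
  induction todo with
  | nil =>
    intro done s
    rw [show (6 * (done.length:Int) + 6 * ([]:List Int).length) = 6 * done.length by simp,
        PySem.List.pyRange_one_eq_nil (by omega)]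
    simp [pvDewhitenGo]
  | cons t rest ih =>
    intro done s
    have hlen : ((t :: rest).length : Int) = rest.length + 1 := by simp
    rw [show (6 * (done.length:Int) + 6 * ((t :: rest).length:Int))
          = (6 * (done.length:Int) + 6) + 6 * (rest.length:Int) by rw [hlen]; ring,
        PySem.List.pyRange_one_append (6 * (done.length:Int)) (6 * (done.length:Int) + 6)
          ((6 * (done.length:Int) + 6) + 6 * (rest.length:Int)) (by omega) (by omega),
        List.foldl_append, pvRangeSix, List.map_cons, pvChunk s]
    have hget : (done ++ PySem.Int.band t 63 :: rest.map (fun t => PySem.Int.band t 63)).getD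
        done.length 0 = PySem.Int.band t 63 := by simp [List.getD]
    have hset : ∀ v : Int,
        (done ++ PySem.Int.band t 63 :: rest.map (fun t => PySem.Int.band t 63)).set
          done.length v = done ++ v :: rest.map (fun t => PySem.Int.band t 63) := by
      intro v; simp
    have hval : PySem.Int.band (PySem.Int.bxor (PySem.Int.band t 63) (pvNextMask (s:Int)).1) 63
        = PySem.Int.bxor (PySem.Int.band t 63) (pvNextMask (s:Int)).1 := by
      obtain ⟨h1, h2⟩ := pvBand63_bounds t
      obtain ⟨h3, h4, _, _⟩ := pvNextMask_bounds s
      exact pvXorMask' _ _ h1 h2 h3 h4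
    rw [hget, hset, hval]
    obtain ⟨_, _, h5, h6⟩ := pvNextMask_bounds s
    set w : Int := PySem.Int.bxor (PySem.Int.band t 63) (pvNextMask (s:Int)).1 with hw
    have hs' : ((⟨(pvNextMask (s:Int)).2.toNat, by omega⟩ : Fin 128) : Int)
        = (pvNextMask (s:Int)).2 := by
      simp [Int.toNat_of_nonneg h5]
    have happ : done ++ w :: rest.map (fun t => PySem.Int.band t 63)
        = (done ++ [w]) ++ rest.map (fun t => PySem.Int.band t 63) := by simp
    have hlen2 : done.length + 1 = (done ++ [w]).length := by simp
    have hb1 : (6 * (done.length:Int) + 6) = 6 * ((done ++ [w]).length : Int) := by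
      simp; ring
    rw [happ, hlen2, ← hs', hb1]
    rw [ih (done ++ [w]) ⟨(pvNextMask (s:Int)).2.toNat, by omega⟩]
    simp [pvDewhitenGo, hs', hw]

lemma pvSeedState_bounds : ∀ c : Fin 19,
    0 ≤ PySem.Int.bor ((3:Int) <<< 5) (PySem.Int.bor 64 (c : Int)) ∧
    PySem.Int.bor ((3:Int) <<< 5) (PySem.Int.bor 64 (c : Int)) < 128 := by decide

-- ===== B side: the PN-period table is the stream of MSBs of the LFSR iterates =====

lemma pvPn_foldl : ∀ (n : Nat) (s : Fin 128),
    (List.range n).foldl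
      (fun (acc : List Int × Int) _ =>
        (acc.1 ++ [PySem.Int.band (acc.2 >>> 6) 1],
         PySem.Int.bor (PySem.Int.band (acc.2 <<< 1) 127)
           (PySem.Int.band (PySem.Int.bxor (acc.2 >>> 6) (acc.2 >>> 3)) 1)))
      ([], (s : Int))
    = ((List.range n).map (fun k => pvMsb (pvStepF^[k] s)), ((pvStepF^[n] s : Fin 128) : Int)) := by
  intro n s
  induction n with
  | zero => simp
  | succ n ih =>
    rw [List.range_succ, List.foldl_append, ih]
    simp only [List.foldl_cons, List.foldl_nil, List.map_append, List.map_cons, List.map_nil]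
    refine Prod.ext ?_ ?_
    · simp [pvMsb]
    · simp only []
      rw [pvStepInt_eq, Function.iterate_succ_apply']

lemma pvBitsTable (s : Fin 128) :
    pvPnPeriod (s : Int) = (List.range 127).map (fun k => pvMsb (pvStepF^[k] s)) := by
  unfold pvPnPeriod
  rw [pvPn_foldl]

set_option maxRecDepth 32768 in
lemma pvIter127 : ∀ s : Fin 128, pvStepF^[127] s = s := by decide

set_option maxRecDepth 4096 in
lemma pvIterMod : ∀ (k : Nat) (s : Fin 128), pvStepF^[k] s = pvStepF^[k % 127] s := by
  intro k
  induction k using Nat.strong_induction_on with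
  | _ k ih =>
    intro s
    by_cases h : k < 127
    · rw [Nat.mod_eq_of_lt h]
    · have hk : k = (k - 127) + 127 := by omega
      rw [hk, Function.iterate_add_apply, pvIter127, ih (k - 127) (by omega) s]
      congr 1
      omega

-- the 6 whitening bits of symbol j, read from the table, = pvNextMask of the state at symbol j
set_option maxRecDepth 8192 in
lemma pvMask6_eq : ∀ s : Fin 128,
    (List.range 6).foldl
      (fun m b => PySem.Int.bor (m <<< 1) (pvMsb (pvStepF^[b] s))) 0
    = (pvNextMask (s : Int)).1 := by decide

set_option maxRecDepth 8192 in
lemma pvNextMask_state : ∀ s : Fin 128,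
    (pvNextMask (s : Int)).2 = ((pvStepF^[6] s : Fin 128) : Int) := by decide

lemma pvMaskAt_table (s0 : Fin 128) (j : Nat) :
    pvMaskAt (pvPnPeriod (s0 : Int)) (6 * (j : Int))
    = (pvNextMask ((pvStepF^[6 * j] s0 : Fin 128) : Int)).1 := by
  unfold pvMaskAt
  rw [← pvMask6_eq (pvStepF^[6 * j] s0)]
  apply PySem.List.foldl_congr_mem
  intro m b hb
  have hb6 : b < 6 := by simpa using List.mem_range.mp hb
  congr 1
  have hcast : 6 * (j : Int) + (b : Int) = ((6 * j + b : Nat) : Int) := by push_cast; ring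
  rw [hcast, show (127:Int) = ((127:Nat):Int) from rfl, PySem.Int.mod_natCast,
      PySem.List.pyGetD_natCast, pvBitsTable,
      PySem.List.getD_map_range _ _ _ _ (Nat.mod_lt _ (by norm_num)),
      ← pvIterMod, Nat.add_comm (6 * j) b, Function.iterate_add_apply]

lemma pvGoTable : ∀ (todo : List Int) (j : Nat) (s0 : Fin 128),
    pvDewhitenGo ((pvStepF^[6 * j] s0 : Fin 128) : Int) todo
    = (PySem.List.enumerate todo (j : Int)).map
        (fun p => PySem.Int.bxor (PySem.Int.band p.2 63)
          (pvMaskAt (pvPnPeriod (s0 : Int)) (6 * p.1))) := by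
  intro todo
  induction todo with
  | nil => intro j s0; simp [pvDewhitenGo, PySem.List.enumerate]
  | cons t rest ih =>
    intro j s0
    rw [PySem.List.enumerate_cons, List.map_cons]
    show (PySem.Int.bxor (PySem.Int.band t 63)
          (pvNextMask ((pvStepF^[6 * j] s0 : Fin 128) : Int)).1)
        :: pvDewhitenGo (pvNextMask ((pvStepF^[6 * j] s0 : Fin 128) : Int)).2 rest = _
    rw [pvMaskAt_table s0 j, pvNextMask_state, ← Function.iterate_add_apply,
        show 6 + 6 * j = 6 * (j + 1) by ring]
    have hj1 : ((j : Int) + 1) = ((j + 1 : Nat) : Int) := by push_cast; ring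
    rw [show (pvStepF^[6 * (j + 1)] s0 : Int) = ((pvStepF^[6 * (j + 1)] s0 : Fin 128) : Int) from rfl,
        ih (j + 1) s0, hj1]

-- ===== VERDICT (by name: the statement is the Claim_ definition above) =====
theorem dewhitening_symbols_py_spec : Claim_equal_dewhitening_symbols_py := by
  intro seed symbols _
  unfold Spec_dewhitening_symbols_py dewhitening_symbols_py dewhitening_symbols_py_alt
  split_ifs with h
  · rfl
  · rw [not_or, not_lt, not_le] at h
    obtain ⟨h0, h19⟩ := h
    have hc : seed = ((⟨seed.toNat, by omega⟩ : Fin 19) : Int) := by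
      simp [Int.toNat_of_nonneg h0]
    set c : Fin 19 := ⟨seed.toNat, by omega⟩ with hcc
    obtain ⟨hb0, hb1⟩ := pvSeedState_bounds c
    have hs : (((⟨(PySem.Int.bor ((3:Int) <<< 5) (PySem.Int.bor 64 (c:Int))).toNat, by omega⟩ : Fin 128)) : Int)
        = PySem.Int.bor ((3:Int) <<< 5) (PySem.Int.bor 64 (c:Int)) := by
      simp [Int.toNat_of_nonneg hb0]
    set s0 : Fin 128 := ⟨(PySem.Int.bor ((3:Int) <<< 5) (PySem.Int.bor 64 (c:Int))).toNat, by omega⟩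
      with hs0
    have hm := pvMain symbols [] s0
    rw [hs] at hm
    simp only [List.nil_append, List.length_nil] at hm
    have hg := pvGoTable symbols 0 s0
    simp only [Nat.mul_zero, Function.iterate_zero, id_eq, Nat.cast_zero] at hg
    rw [hs] at hg
    rw [show (6 * (((0:Nat)):Int) + 6 * (symbols.length:Int))
          = ((symbols.length * 6 : Nat) : Int) by push_cast; ring] at hm
    rw [show (6 * (((0:Nat)):Int)) = (0:Int) by norm_num] at hm
    rw [hc]
    exact congrArg some (hm.trans hg)
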